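-- pv_equiv track=rewrite | github.com/halfpeaw/CodeProblems | SupportFunctions/SortFunctions.py | radixSplit
-- ===== SOURCE A (Python) =====
-- def radixSplit(nums, k):
--   less = []
--   greater = []
--   for num in nums:
--     if num & 2**k:
--       greater.append(num)
--     else:
--       less.append(num)
--   if k == 0:
--     return less, greater
--   else:
--     lessSmall, lessBig = radixSplit(less,k-1)
--     greaterSmall, greaterBig = radixSplit(greater,k-1)
--     return (lessSmall + lessBig), (greaterSmall + greaterBig)
-- ===== SOURCE B (Python) =====
-- def radixSplit(nums, k):
--   mask = 2**(k+1) - 1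
--   bit = 2**k
--   s = sorted(nums, key=lambda x: x & mask)
--   less = [x for x in s if not (x & bit)]
--   greater = [x for x in s if x & bit]
--   return less, greater
-- ===== Notes on version B (the rewrite author's own statement) =====
-- stated objective: faster
-- what changed: Replaces the recursive bit-by-bit MSD radix partition (which spawns ~2^k recursive calls) with one stable sort keyed on x & (2**(k+1)-1) followed by a single linear split on bit 2**k; intended as faster: a timing run measured B 121x faster at the largest size where A finished (A timed out on larger inputs, so that run could not formally confirm the label).
import Mathlib
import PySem

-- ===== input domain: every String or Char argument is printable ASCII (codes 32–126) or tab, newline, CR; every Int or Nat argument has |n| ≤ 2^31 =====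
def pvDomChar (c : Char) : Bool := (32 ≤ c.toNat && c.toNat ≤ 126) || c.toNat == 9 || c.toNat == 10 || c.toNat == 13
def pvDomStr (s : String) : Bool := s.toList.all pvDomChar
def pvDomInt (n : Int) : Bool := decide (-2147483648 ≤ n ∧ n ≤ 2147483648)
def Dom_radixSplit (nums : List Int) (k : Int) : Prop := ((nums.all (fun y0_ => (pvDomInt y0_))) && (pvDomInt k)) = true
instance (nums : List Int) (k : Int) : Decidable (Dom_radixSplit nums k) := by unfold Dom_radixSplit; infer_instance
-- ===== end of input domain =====

-- B replaces A's recursive bit-by-bit MSD radix partition by ONE stable sort on the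
-- masked key x & (2**(k+1)-1) followed by a single split on bit 2**k (same return value).

-- ===== PORT A =====
def radixSplit (nums : List Int) (k : Int) : List Int × List Int :=
  -- 'for num in nums: if num & 2**k: greater.append(num) else: less.append(num)'
  let p := nums.foldl (fun (acc : List Int × List Int) num =>
      if PySem.Int.band num ((2:Int) ^ k.toNat) != 0 then (acc.1, acc.2 ++ [num])
      else (acc.1 ++ [num], acc.2)) ([], [])
  -- Python: 'if k == 0: return less, greater'.  For k < 0 Python raises
  -- (TypeError) or recurses forever — outside Pre_; the guard only makes the port total.
  if k ≤ 0 then p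
  else
    let l := radixSplit p.1 (k - 1)
    let g := radixSplit p.2 (k - 1)
    (l.1 ++ l.2, g.1 ++ g.2)
termination_by k.toNat
decreasing_by all_goals omega

-- ===== PORT B =====
def radixSplit_alt (nums : List Int) (k : Int) : List Int × List Int :=
  let mask := (2:Int) ^ (k + 1).toNat - 1   -- 2**(k+1) - 1
  let bit  := (2:Int) ^ k.toNat             -- 2**k
  let s := PySem.List.sorted nums (fun x => PySem.Int.band x mask) false
  (s.filter (fun x => PySem.Int.band x bit == 0),
   s.filter (fun x => PySem.Int.band x bit != 0))

-- ===== PRECONDITION & SPEC =====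
-- Pre_ excludes k < 0, where Python A raises TypeError (2**k is a float) on nonempty
-- input and recurses without bound on empty input; A returns normally iff 0 ≤ k.
def Pre_radixSplit (nums : List Int) (k : Int) : Prop := 0 ≤ k
instance (nums : List Int) (k : Int) : Decidable (Pre_radixSplit nums k) := by
  unfold Pre_radixSplit; infer_instance
def pvWitness_radixSplit : List Int × Int := ([5, -3, 2, 6, 3], 2)

def Spec_radixSplit (nums : List Int) (k : Int) (out : List Int × List Int) : Prop := out = radixSplit_alt nums k
instance (nums : List Int) (k : Int) (out : List Int × List Int) : Decidable (Spec_radixSplit nums k out) := by unfold Spec_radixSplit; infer_instance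

-- ===== CLAIM (what is proved, stated in full; the proofs are below) =====
def Claim_equal_radixSplit : Prop := ∀ (nums : List Int) (k : Int), Dom_radixSplit nums k → Pre_radixSplit nums k → Spec_radixSplit nums k (radixSplit nums k)

-- ===== LEMMAS AND PROOFS =====

-- ---- integer bit arithmetic: masking is emod ----

-- (-m-1) % 2^n, Python-style floor mod
lemma negEmod (m n : Nat) :
    (-(m:Int) - 1) % ((2:Int)^n) = (2:Int)^n - 1 - ((m % 2^n : Nat) : Int) := by
  have hp : (0:Int) < 2^n := by positivity
  have hlt : ((m % 2^n : Nat) : Int) < 2^n := by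
    exact_mod_cast Nat.mod_lt m (by positivity)
  have hge : (0:Int) ≤ ((m % 2^n : Nat) : Int) := by positivity
  have hdecomp : -(m:Int) - 1
      = ((2:Int)^n - 1 - ((m % 2^n : Nat) : Int)) + (2:Int)^n * (-(((m / 2^n : Nat) : Int)) - 1) := by
    have := Nat.div_add_mod m (2^n)
    push_cast
    push_cast at this
    linarith
  rw [hdecomp, Int.add_mul_emod_self_left, Int.emod_eq_of_lt (by omega) (by omega)]

-- x & (2^n - 1) = x % 2^n (Python semantics on both signs)
lemma maskA (x : Int) (n : Nat) :
    PySem.Int.band x ((2:Int)^n - 1) = x % (2:Int)^n := by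
  have hm : ((2:Int)^n - 1) = ((2^n - 1 : Nat) : Int) := by
    have : (1:Nat) ≤ 2^n := Nat.one_le_two_pow
    push_cast [this]; ring
  by_cases hx : 0 ≤ x
  · rw [← Int.toNat_of_nonneg hx, hm]
    rw [PySem.Int.band_natCast]
    rw [Nat.and_two_pow_sub_one_eq_mod]
    push_cast
    rfl
  · have h1 : ¬ (0 ≤ x) := hx
    have hmask : (0:Int) ≤ (2:Int)^n - 1 := by
      have : (0:Int) < 2^n := by positivity
      omega
    simp only [PySem.Int.band, if_neg h1, if_pos hmask]
    set m : Nat := (-x - 1).toNat with hmdef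
    have hxm : x = -(m:Int) - 1 := by
      have : ((-x - 1).toNat : Int) = -x - 1 := Int.toNat_of_nonneg (by omega)
      omega
    have htn : ((2:Int)^n - 1).toNat = 2^n - 1 := by
      rw [hm]; exact Int.toNat_natCast _
    rw [htn, Nat.and_comm, Nat.and_two_pow_sub_one_eq_mod]
    rw [hxm, negEmod]
    have hle : m % 2^n ≤ 2^n - 1 := by
      have := Nat.mod_lt m (show 0 < 2^n by positivity); omega
    have h2 : (1:Nat) ≤ 2^n := Nat.one_le_two_pow
    push_cast [hle, h2]
    ring

-- x & 2^n  =  x % 2^(n+1) - x % 2^n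
lemma bitB (x : Int) (n : Nat) :
    PySem.Int.band x ((2:Int)^n) = x % (2:Int)^(n+1) - x % (2:Int)^n := by
  by_cases hx : 0 ≤ x
  · rw [← Int.toNat_of_nonneg hx]
    set a : Nat := x.toNat
    have hband : PySem.Int.band (a : Int) ((2:Int)^n) = ((a &&& 2^n : Nat) : Int) := by
      have h : ((2:Int)^n) = ((2^n : Nat) : Int) := by push_cast; ring
      rw [h, PySem.Int.band_natCast]
    rw [hband, Nat.and_two_pow, Nat.toNat_testBit]
    have hsucc : a % 2^(n+1) = a % 2^n + 2^n * (a / 2^n % 2) := Nat.mod_pow_succ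
    have c1 : ((a:Int)) % (2:Int)^(n+1) = ((a % 2^(n+1) : Nat) : Int) := by push_cast; ring
    have c2 : ((a:Int)) % (2:Int)^n = ((a % 2^n : Nat) : Int) := by push_cast; ring
    rw [c1, c2, hsucc]
    push_cast; ring
  · have hmask : (0:Int) ≤ (2:Int)^n := by positivity
    simp only [PySem.Int.band, if_neg hx, if_pos hmask]
    set m : Nat := (-x - 1).toNat with hmdef
    have hxm : x = -(m:Int) - 1 := by
      have : ((-x - 1).toNat : Int) = -x - 1 := Int.toNat_of_nonneg (by omega)
      omega
    have htn : ((2:Int)^n).toNat = 2^n := by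
      have : ((2:Int)^n) = ((2^n : Nat) : Int) := by push_cast; ring
      rw [this]; exact Int.toNat_natCast _
    rw [htn, Nat.and_comm, Nat.and_two_pow, Nat.toNat_testBit]
    rw [hxm, negEmod, negEmod]
    have hsucc : m % 2^(n+1) = m % 2^n + 2^n * (m / 2^n % 2) := Nat.mod_pow_succ
    rcases Nat.mod_two_eq_zero_or_one (m / 2^n) with hq | hq
    · rw [hq] at hsucc
      rw [hq]
      simp only [Nat.mul_zero, Nat.zero_mul, Nat.sub_zero, Nat.add_zero] at hsucc ⊢
      rw [hsucc]
      push_cast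
      ring
    · rw [hq] at hsucc
      rw [hq]
      simp only [Nat.one_mul, Nat.mul_one] at hsucc ⊢
      rw [hsucc, Nat.sub_self]
      have hcast : ((m % 2^n + 2^n : Nat) : Int) = ((m % 2^n : Nat):Int) + 2^n := by
        push_cast; ring
      rw [hcast]
      push_cast
      ring

lemma bit01 (x : Int) (n : Nat) :
    PySem.Int.band x ((2:Int)^n) = 0 ∨ PySem.Int.band x ((2:Int)^n) = (2:Int)^n := by
  have hp : (0:Int) < 2^n := by positivity
  have hh := bitB x n
  set b := x % (2:Int)^(n+1) with hb
  set a := x % (2:Int)^n with ha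
  have hba : b % (2:Int)^n = a := by
    rw [hb, ha]; exact Int.emod_emod_of_dvd x (pow_dvd_pow 2 (by omega))
  have hb0 : 0 ≤ b := Int.emod_nonneg x (by positivity)
  have hb1 : b < (2:Int)^(n+1) := Int.emod_lt_of_pos x (by positivity)
  have ha0 : 0 ≤ a := Int.emod_nonneg x (by positivity)
  have ha1 : a < (2:Int)^n := Int.emod_lt_of_pos x hp
  have hdm := Int.ediv_add_emod b ((2:Int)^n)
  rw [hba] at hdm
  have hq0 : 0 ≤ b / (2:Int)^n := Int.ediv_nonneg hb0 (le_of_lt hp)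
  have hq2 : b / (2:Int)^n < 2 := by
    apply Int.ediv_lt_of_lt_mul hp
    have : ((2:Int))^(n+1) = 2 * 2^n := by ring
    omega
  interval_cases h : b / (2:Int)^n <;> omega

lemma modSucc0 (x : Int) (n : Nat) (h : PySem.Int.band x ((2:Int)^n) = 0) :
    x % (2:Int)^(n+1) = x % (2:Int)^n := by
  have := bitB x n; omega

lemma modSucc1 (x : Int) (n : Nat) (h : PySem.Int.band x ((2:Int)^n) ≠ 0) :
    x % (2:Int)^(n+1) = x % (2:Int)^n + (2:Int)^n := by
  have h01 := bit01 x n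
  have := bitB x n
  omega

-- ---- stable insertion-sort machinery ----

lemma insertBy_append_of_before (bef : Int → Int → Bool) (x : Int) (A B : List Int)
    (hB : ∀ b ∈ B, bef x b = true) :
    PySem.List.insertBy bef x (A ++ B) = PySem.List.insertBy bef x A ++ B := by
  induction A with
  | nil =>
    cases B with
    | nil => rfl
    | cons b B' => simp [PySem.List.insertBy, hB b (by simp)]
  | cons y A' ih =>
    simp only [List.cons_append, PySem.List.insertBy]
    by_cases h : bef x y <;> simp [h, ih]

lemma insertBy_append_of_not_before (bef : Int → Int → Bool) (x : Int) (A B : List Int)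
    (hA : ∀ a ∈ A, bef x a = false) :
    PySem.List.insertBy bef x (A ++ B) = A ++ PySem.List.insertBy bef x B := by
  induction A with
  | nil => rfl
  | cons y A' ih =>
    simp only [List.cons_append, PySem.List.insertBy, hA y (by simp)]
    simp only [Bool.false_eq_true, if_false, List.cons.injEq, true_and]
    exact ih (fun a ha => hA a (by simp [ha]))

lemma insertBy_congr (b1 b2 : Int → Int → Bool) (x : Int) (A : List Int)
    (h : ∀ a ∈ A, b1 x a = b2 x a) :
    PySem.List.insertBy b1 x A = PySem.List.insertBy b2 x A := by
  induction A with
  | nil => rfl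
  | cons y A' ih =>
    simp only [PySem.List.insertBy, h y (by simp)]
    by_cases hb : b2 x y <;>
      simp [hb, ih (fun a ha => h a (by simp [ha]))]

lemma foldl_insertBy_congr (bef1 bef2 : Int → Int → Bool) (P : Int → Prop)
    (h : ∀ a b, P a → P b → bef1 a b = bef2 a b) :
    ∀ (l A : List Int), (∀ a ∈ A, P a) → (∀ x ∈ l, P x) →
      l.foldl (fun acc x => PySem.List.insertBy bef1 x acc) A
        = l.foldl (fun acc x => PySem.List.insertBy bef2 x acc) A := by
  intro l
  induction l with
  | nil => intro A _ _; rfl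
  | cons x l ih =>
    intro A hA hl
    have hx : P x := hl x (by simp)
    simp only [List.foldl_cons]
    rw [insertBy_congr bef1 bef2 x A (fun a ha => h x a hx (hA a ha))]
    exact ih _ (fun a ha => by
        rcases (PySem.List.mem_insertBy _ _ _ _).mp ha with h' | h'
        · exact h' ▸ hx
        · exact hA a h')
      (fun y hy => hl y (by simp [hy]))

lemma sorted_congr_lt (l : List Int) (k1 k2 : Int → Int)
    (h : ∀ a ∈ l, ∀ b ∈ l, (k1 a < k1 b ↔ k2 a < k2 b)) :
    PySem.List.sorted l k1 false = PySem.List.sorted l k2 false := by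
  rw [PySem.List.sorted_eq_foldl_insertBy, PySem.List.sorted_eq_foldl_insertBy]
  exact foldl_insertBy_congr _ _ (fun a => a ∈ l)
    (fun a b ha hb => by simp [h a ha b hb]) l [] (by simp) (fun x hx => hx)

lemma foldl_insertBy_split (key : Int → Int) (p : Int → Bool)
    (h : ∀ a b, p a = true → p b = false → key a < key b) :
    ∀ (l A B : List Int), (∀ a ∈ A, p a = true) → (∀ b ∈ B, p b = false) →
      l.foldl (fun acc x => PySem.List.insertBy (fun a b => decide (key a < key b)) x acc) (A ++ B)
        = (l.filter p).foldl (fun acc x => PySem.List.insertBy (fun a b => decide (key a < key b)) x acc) A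
          ++ (l.filter (fun x => !p x)).foldl (fun acc x => PySem.List.insertBy (fun a b => decide (key a < key b)) x acc) B := by
  intro l
  induction l with
  | nil => intro A B _ _; rfl
  | cons x l ih =>
    intro A B hA hB
    by_cases hp : p x = true
    · have hstep : PySem.List.insertBy (fun a b => decide (key a < key b)) x (A ++ B)
          = PySem.List.insertBy (fun a b => decide (key a < key b)) x A ++ B :=
        insertBy_append_of_before _ x A B (fun b hb => by simp [h x b hp (hB b hb)])
      simp only [List.foldl_cons, hstep, List.filter_cons, hp, if_pos, Bool.not_true]
      simp only [Bool.false_eq_true, if_false]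
      exact ih _ B (fun a ha => by
          rcases (PySem.List.mem_insertBy _ _ _ _).mp ha with h' | h'
          · exact h' ▸ hp
          · exact hA a h') hB
    · have hp' : p x = false := by simpa using hp
      have hstep : PySem.List.insertBy (fun a b => decide (key a < key b)) x (A ++ B)
          = A ++ PySem.List.insertBy (fun a b => decide (key a < key b)) x B := by
        apply insertBy_append_of_not_before
        intro a ha
        have := h a x (hA a ha) hp'
        simp [not_lt_of_gt this]
      simp only [List.foldl_cons, hstep, List.filter_cons, hp', Bool.not_false]
      simp only [Bool.false_eq_true, if_false, if_pos]
      exact ih A _ hA (fun b hb => by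
          rcases (PySem.List.mem_insertBy _ _ _ _).mp hb with h' | h'
          · exact h' ▸ hp'
          · exact hB b h')

lemma sorted_split (key : Int → Int) (p : Int → Bool)
    (h : ∀ a b, p a = true → p b = false → key a < key b) (l : List Int) :
    PySem.List.sorted l key false
      = PySem.List.sorted (l.filter p) key false ++ PySem.List.sorted (l.filter (fun x => !p x)) key false := by
  rw [PySem.List.sorted_eq_foldl_insertBy, PySem.List.sorted_eq_foldl_insertBy,
    PySem.List.sorted_eq_foldl_insertBy]
  have := foldl_insertBy_split key p h l [] [] (by simp) (by simp)
  simpa using this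

-- ---- A's partition loop is two filters ----

lemma partA (t : Int) : ∀ (xs a b : List Int),
    xs.foldl (fun (acc : List Int × List Int) num =>
        if PySem.Int.band num t != 0 then (acc.1, acc.2 ++ [num])
        else (acc.1 ++ [num], acc.2)) (a, b)
      = (a ++ xs.filter (fun x => PySem.Int.band x t == 0),
         b ++ xs.filter (fun x => PySem.Int.band x t != 0)) := by
  intro xs
  induction xs with
  | nil => intro a b; simp
  | cons x xs ih =>
    intro a b
    simp only [List.foldl_cons, List.filter_cons]
    by_cases hx : PySem.Int.band x t = 0
    · have hb : (PySem.Int.band x t != 0) = false := by simp [hx]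
      rw [hb, if_neg Bool.false_ne_true, ih]
      simp [hx, List.append_assoc]
    · have hb : (PySem.Int.band x t != 0) = true := by simp [hx]
      rw [hb, if_pos rfl, ih]
      simp [hx, List.append_assoc]

-- ---- the main characterisation of A ----

-- S n l : stable sort by the low n+1 bits
def S (n : Nat) (l : List Int) : List Int :=
  PySem.List.sorted l (fun x => PySem.Int.band x ((2:Int)^(n+1) - 1)) false

def bitClear (n : Nat) (x : Int) : Bool := PySem.Int.band x ((2:Int)^n) == 0
def bitSet (n : Nat) (x : Int) : Bool := PySem.Int.band x ((2:Int)^n) != 0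

lemma bitSet_eq_not_bitClear (n : Nat) : bitSet n = (fun x => !bitClear n x) := by
  funext x; simp [bitSet, bitClear, bne]

lemma S0_clear (l : List Int) (h : ∀ x ∈ l, PySem.Int.band x 1 = 0) : S 0 l = l := by
  apply PySem.List.sorted_eq_self_of_pairwise
  apply List.pairwise_of_forall_mem_list
  intro a ha b hb
  have e : ((2:Int)^(0+1) - 1) = 1 := by norm_num
  rw [e, h a ha, h b hb]

lemma S0_set (l : List Int) (h : ∀ x ∈ l, PySem.Int.band x 1 ≠ 0) : S 0 l = l := by
  apply PySem.List.sorted_eq_self_of_pairwise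
  apply List.pairwise_of_forall_mem_list
  intro a ha b hb
  have e : ((2:Int)^(0+1) - 1) = 1 := by norm_num
  have va : PySem.Int.band a 1 = 1 := by
    rcases bit01 a 0 with h' | h'
    · exact absurd (by simpa using h') (h a ha)
    · simpa using h'
  have vb : PySem.Int.band b 1 = 1 := by
    rcases bit01 b 0 with h' | h'
    · exact absurd (by simpa using h') (h b hb)
    · simpa using h'
  rw [e, va, vb]

lemma split_at_bit (n : Nat) (l : List Int) :
    S n l = S n (l.filter (bitClear n)) ++ S n (l.filter (bitSet n)) := by
  rw [bitSet_eq_not_bitClear]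
  apply sorted_split
  intro a b hpa hpb
  have ha : PySem.Int.band a ((2:Int)^n) = 0 := by simpa [bitClear] using hpa
  have hb : PySem.Int.band b ((2:Int)^n) ≠ 0 := by simpa [bitClear] using hpb
  rw [maskA, maskA, modSucc0 a n ha, modSucc1 b n hb]
  have h1 : a % (2:Int)^n < 2^n := Int.emod_lt_of_pos a (by positivity)
  have h2 : 0 ≤ b % (2:Int)^n := Int.emod_nonneg b (by positivity)
  omega

lemma main_radix (c : Nat) : ∀ xs : List Int,
    radixSplit xs (c : Int)
      = (S c (xs.filter (bitClear c)), S c (xs.filter (bitSet c))) := by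
  induction c with
  | zero =>
    intro xs
    rw [radixSplit]
    simp only []
    rw [if_pos (show ((0:Nat):Int) ≤ 0 by norm_num)]
    rw [partA]
    simp only [List.nil_append]
    refine Prod.ext ?_ ?_
    · show _ = S 0 (xs.filter (bitClear 0))
      rw [S0_clear _ (fun x hx => by
        have := (List.mem_filter.mp hx).2
        simpa [bitClear, pow_zero] using this)]
      rfl
    · show _ = S 0 (xs.filter (bitSet 0))
      rw [S0_set _ (fun x hx => by
        have := (List.mem_filter.mp hx).2
        simpa [bitSet, pow_zero] using this)]
      rfl
  | succ c ih =>
    intro xs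
    rw [radixSplit]
    have hguard : ¬ ((c + 1 : Nat) : Int) ≤ 0 := by push_cast; omega
    simp only []
    rw [if_neg hguard]
    rw [partA]
    simp only [List.nil_append, Int.toNat_natCast]
    have hsub : ((c + 1 : Nat) : Int) - 1 = (c : Int) := by push_cast; ring
    rw [hsub, ih, ih]
    have hP : (fun x => PySem.Int.band x ((2:Int)^(c+1)) == 0) = bitClear (c+1) := rfl
    have hQ : (fun x => PySem.Int.band x ((2:Int)^(c+1)) != 0) = bitSet (c+1) := rfl
    rw [hP, hQ]
    set l := xs.filter (bitClear (c+1)) with hl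
    set g := xs.filter (bitSet (c+1)) with hg
    have hless : S c (l.filter (bitClear c)) ++ S c (l.filter (bitSet c)) = S (c+1) l := by
      rw [← split_at_bit]
      apply sorted_congr_lt
      intro a ha b hb
      have ha' : PySem.Int.band a ((2:Int)^(c+1)) = 0 := by
        have := (List.mem_filter.mp (hl ▸ ha)).2
        simpa [bitClear] using this
      have hb' : PySem.Int.band b ((2:Int)^(c+1)) = 0 := by
        have := (List.mem_filter.mp (hl ▸ hb)).2
        simpa [bitClear] using this
      rw [maskA, maskA, maskA, maskA, modSucc0 a (c+1) ha', modSucc0 b (c+1) hb']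
    have hgreater : S c (g.filter (bitClear c)) ++ S c (g.filter (bitSet c)) = S (c+1) g := by
      rw [← split_at_bit]
      apply sorted_congr_lt
      intro a ha b hb
      have ha' : PySem.Int.band a ((2:Int)^(c+1)) ≠ 0 := by
        have := (List.mem_filter.mp (hg ▸ ha)).2
        simpa [bitSet] using this
      have hb' : PySem.Int.band b ((2:Int)^(c+1)) ≠ 0 := by
        have := (List.mem_filter.mp (hg ▸ hb)).2
        simpa [bitSet] using this
      rw [maskA, maskA, maskA, maskA, modSucc1 a (c+1) ha', modSucc1 b (c+1) hb']
      omega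
    rw [hless, hgreater]

-- ===== VERDICT (by name: the statement is the Claim_ definition above) =====
theorem radixSplit_spec : Claim_equal_radixSplit := by
  intro nums k _ hpre
  unfold Spec_radixSplit radixSplit_alt
  obtain ⟨c, rfl⟩ : ∃ c : Nat, k = (c : Int) := ⟨k.toNat, (Int.toNat_of_nonneg hpre).symm⟩
  have hk1 : ((c : Int) + 1).toNat = c + 1 := by omega
  simp only [Int.toNat_natCast, hk1]
  rw [main_radix]
  have hP : (fun x => PySem.Int.band x ((2:Int)^c) == 0) = bitClear c := rfl
  have hQ : (fun x => PySem.Int.band x ((2:Int)^c) != 0) = bitSet c := rfl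
  have hs : PySem.List.sorted nums (fun x => PySem.Int.band x ((2:Int)^(c+1) - 1)) false
      = S c nums := rfl
  rw [hP, hQ, hs, split_at_bit c nums]
  have hmem0 : ∀ x ∈ S c (nums.filter (bitClear c)), bitClear c x = true := by
    intro x hx
    have := (PySem.List.mem_sorted _ _ _ x).mp hx
    exact (List.mem_filter.mp this).2
  have hmem1 : ∀ x ∈ S c (nums.filter (bitSet c)), bitSet c x = true := by
    intro x hx
    have := (PySem.List.mem_sorted _ _ _ x).mp hx
    exact (List.mem_filter.mp this).2
  refine Prod.ext ?_ ?_
  · dsimp only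
    rw [List.filter_append]
    have e1 : List.filter (bitClear c) (S c (List.filter (bitClear c) nums))
        = S c (List.filter (bitClear c) nums) := List.filter_eq_self.mpr hmem0
    have e2 : List.filter (bitClear c) (S c (List.filter (bitSet c) nums)) = [] := by
      apply List.filter_eq_nil_iff.mpr
      intro a ha
      have h1 := hmem1 a ha
      simp only [bitSet, bne_iff_ne, ne_eq] at h1
      simp [bitClear, h1]
    rw [e1, e2, List.append_nil]
  · dsimp only
    rw [List.filter_append]
    have e1 : List.filter (bitSet c) (S c (List.filter (bitClear c) nums)) = [] := by
      apply List.filter_eq_nil_iff.mpr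
      intro a ha
      have h1 := hmem0 a ha
      simp only [bitClear, beq_iff_eq] at h1
      simp [bitSet, h1]
    have e2 : List.filter (bitSet c) (S c (List.filter (bitSet c) nums))
        = S c (List.filter (bitSet c) nums) := List.filter_eq_self.mpr hmem1
    rw [e1, e2, List.nil_append]
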